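-- pv_equiv track=rewrite | github.com/lykos1974/sm | experiments/render_pattern_execution_audit.py | symbol_matches
-- ===== SOURCE A (Python) =====
-- def symbol_variants(symbol: str) -> list[str]:
--     variants = [symbol]
--     if ":" in symbol:
--         base = symbol.split(":", 1)[1]
--         variants.append(base)
--     else:
--         base = symbol
--         variants.append(f"BINANCE_FUT:{symbol}")
--     if base.upper().endswith("USDT"):
--         variants.append(base[:-4])
--     else:
--         variants.append(f"{base}USDT")
--         variants.append(f"BINANCE_FUT:{base}USDT")
--     return list(dict.fromkeys(variants))
--
-- def symbol_matches(symbol: str, filters: set[str] | None) -> bool: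
--     if not filters:
--         return True
--     symbol_values = {item.upper() for item in symbol_variants(symbol)}
--     for symbol_filter in filters:
--         if symbol_values & {item.upper() for item in symbol_variants(symbol_filter)}:
--             return True
--     return False
-- ===== SOURCE B (Python) =====
-- def symbol_variants(symbol: str) -> list[str]:
--     variants = [symbol]
--     if ":" in symbol:
--         base = symbol.split(":", 1)[1]
--         variants.append(base)
--     else:
--         base = symbol
--         variants.append(f"BINANCE_FUT:{symbol}")
--     if base.upper().endswith("USDT"):
--         variants.append(base[:-4])
--     else:
--         variants.append(f"{base}USDT")
--         variants.append(f"BINANCE_FUT:{base}USDT")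
--     return list(dict.fromkeys(variants))
--
--
-- def symbol_matches(symbol: str, filters: set[str] | None) -> bool:
--     # Sort-then-scan join: tag every uppercased variant with its origin
--     # (0 = the symbol, 1 = some filter), sort all tagged keys together,
--     # and a match is exactly an adjacent pair with equal key but
--     # different tags.
--     if not filters:
--         return True
--     tagged = [(v.upper(), 0) for v in symbol_variants(symbol)]
--     for symbol_filter in filters:
--         tagged.extend((v.upper(), 1) for v in symbol_variants(symbol_filter))
--     tagged.sort(key=lambda p: p[0])
--     return any(k1 == k2 and t1 != t2
--                for (k1, t1), (k2, t2) in zip(tagged, tagged[1:]))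
-- ===== Notes on version B (the rewrite author's own statement) =====
-- stated objective: alternative
-- what changed: A intersects the symbol's uppercased variant set with each filter's variant set, filter by filter, with an early return; B instead performs a sort-based join: it tags every uppercased variant with its origin (0 = symbol, 1 = filter), sorts all tagged keys into one list, and reports a match exactly when some adjacent pair has equal keys and different tags.
import Mathlib
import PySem

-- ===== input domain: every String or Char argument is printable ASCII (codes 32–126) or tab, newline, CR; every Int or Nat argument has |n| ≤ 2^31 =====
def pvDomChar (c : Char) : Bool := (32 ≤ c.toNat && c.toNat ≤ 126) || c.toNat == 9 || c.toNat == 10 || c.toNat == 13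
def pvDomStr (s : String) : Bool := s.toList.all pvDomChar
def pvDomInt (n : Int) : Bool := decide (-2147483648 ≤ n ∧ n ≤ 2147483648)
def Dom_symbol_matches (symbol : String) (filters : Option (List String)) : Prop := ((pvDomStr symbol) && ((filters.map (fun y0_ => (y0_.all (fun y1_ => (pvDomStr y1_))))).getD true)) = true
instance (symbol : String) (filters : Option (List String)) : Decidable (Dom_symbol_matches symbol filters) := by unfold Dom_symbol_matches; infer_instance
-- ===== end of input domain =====

-- B replaces A's per-filter set intersection with a sort-based join: every uppercased variant is
-- tagged with its origin (0 = symbol, 1 = filter), all tags are sorted by key, and a match is an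
-- adjacent pair with equal keys and different tags (objective: alternative).


-- ===== PORT A =====
-- shared helper (identical function in both Pythons)
def symbol_variants (symbol : String) : List String :=
  let variants := [symbol]
  -- if ":" in symbol: base = symbol.split(":", 1)[1]; variants.append(base)
  -- else: base = symbol; variants.append("BINANCE_FUT:" + symbol)
  let vb : List String × String :=
    if PySem.Str.isIn ":" symbol then
      let base := (PySem.List.pyGet? ((PySem.Str.splitMax? symbol ":" 1).getD []) 1).getD ""
      (variants ++ [base], base)
    else
      (variants ++ ["BINANCE_FUT:" ++ symbol], symbol)
  let variants := vb.1
  let base := vb.2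
  let variants :=
    if PySem.Str.endswith (PySem.Str.upper base) "USDT" then
      variants ++ [PySem.Str.slice base none (some (-4))]
    else
      variants ++ [base ++ "USDT", "BINANCE_FUT:" ++ base ++ "USDT"]
  PySem.List.dedup variants

def symbol_matches (symbol : String) (filters : Option (List String)) : Bool :=
  match filters with
  | none => true
  | some fs =>
    if fs = [] then true
    else
      let symbol_values := PySem.Set.ofList ((symbol_variants symbol).map PySem.Str.upper)
      -- for symbol_filter in filters: if symbol_values & {…}: return True  / return False
      fs.any (fun symbol_filter =>
        !(PySem.Set.inter symbol_values
            (PySem.Set.ofList ((symbol_variants symbol_filter).map PySem.Str.upper))).isEmpty)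

-- ===== PORT B =====
def symbol_matches_alt (symbol : String) (filters : Option (List String)) : Bool :=
  match filters with
  | none => true
  | some fs =>
    if fs = [] then true
    else
      -- tagged = [(v.upper(), 0) for v in symbol_variants(symbol)]
      let tagged : List (String × Int) :=
        (symbol_variants symbol).map (fun v => (PySem.Str.upper v, (0 : Int)))
      -- for f in filters: tagged.extend((v.upper(), 1) for v in symbol_variants(f))
      let tagged := fs.foldl
        (fun acc f => acc ++ (symbol_variants f).map (fun v => (PySem.Str.upper v, (1 : Int))))
        tagged
      -- tagged.sort(key=lambda p: p[0])
      let tagged := PySem.List.sorted tagged (fun p => p.1) false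
      -- any(k1 == k2 and t1 != t2 for (k1,t1),(k2,t2) in zip(tagged, tagged[1:]))
      (tagged.zip (PySem.List.slice tagged (some 1) none)).any
        (fun q => q.1.1 == q.2.1 && q.1.2 != q.2.2)

-- ===== PRECONDITION & SPEC =====
def Spec_symbol_matches (symbol : String) (filters : Option (List String)) (out : Bool) : Prop := out = symbol_matches_alt symbol filters
instance (symbol : String) (filters : Option (List String)) (out : Bool) : Decidable (Spec_symbol_matches symbol filters out) := by unfold Spec_symbol_matches; infer_instance

-- ===== CLAIM (what is proved, stated in full; the proofs are below) =====
def Claim_equal_symbol_matches : Prop := ∀ (symbol : String) (filters : Option (List String)), Dom_symbol_matches symbol filters → Spec_symbol_matches symbol filters (symbol_matches symbol filters)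

-- ===== LEMMAS AND PROOFS =====

lemma nonempty_iff_exists {α : Type} (l : List α) :
    (!l.isEmpty) = true ↔ ∃ x, x ∈ l := by
  cases l <;> simp

-- the adjacent-pair scan, written as a structural recursion (proved equal to the zip form below)
def adjScan : List (String × Int) → Bool
  | a :: b :: r => (a.1 == b.1 && a.2 != b.2) || adjScan (b :: r)
  | _ => false

lemma zip_any_eq_adjScan (l : List (String × Int)) :
    ((l.zip l.tail).any (fun q => q.1.1 == q.2.1 && q.1.2 != q.2.2)) = adjScan l := by
  induction l with
  | nil => rfl
  | cons a rest ih =>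
    cases rest with
    | nil => rfl
    | cons b r =>
      simp only [List.tail_cons, List.zip_cons_cons, List.any_cons, adjScan]
      rw [← ih]
      simp

-- the adjacent-pair scan of a list whose first components are sorted detects exactly
-- the existence of two entries with equal key and different tags
lemma crossing (l : List (String × Int))
    (hp : l.Pairwise (fun a b => a.1 ≤ b.1)) :
    adjScan l = true ↔ ∃ x ∈ l, ∃ y ∈ l, x.1 = y.1 ∧ x.2 ≠ y.2 := by
  induction l with
  | nil => simp [adjScan]
  | cons a rest ih =>
    cases rest with
    | nil => simp [adjScan]
    | cons b r =>
      rw [List.pairwise_cons] at hp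
      obtain ⟨ha, hp'⟩ := hp
      have ihr := ih hp'
      simp only [adjScan, Bool.or_eq_true, Bool.and_eq_true, beq_iff_eq, bne_iff_ne]
      constructor
      · rintro (⟨hk, ht⟩ | h)
        · exact ⟨a, by simp, b, by simp, hk, ht⟩
        · obtain ⟨x, hx, y, hy, hk, ht⟩ := ihr.mp h
          exact ⟨x, List.mem_cons_of_mem _ hx, y, List.mem_cons_of_mem _ hy, hk, ht⟩
      · rintro ⟨x, hx, y, hy, hk, ht⟩
        rcases List.mem_cons.mp hx with hxa | hx' <;> rcases List.mem_cons.mp hy with hya | hy'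
        · exact absurd (hxa ▸ hya ▸ rfl : x.2 = y.2) ht
        · -- x = a, y ∈ b :: r
          subst hxa
          by_cases hab : x.1 = b.1
          · by_cases hab2 : x.2 = b.2
            · have hyb : y ≠ b := fun h => ht (h ▸ hab2)
              have hy'' : y ∈ r := by
                rcases List.mem_cons.mp hy' with h | h
                · exact absurd h hyb
                · exact h
              exact Or.inr (ihr.mpr ⟨b, by simp, y, List.mem_cons_of_mem _ hy'',
                by rw [← hab, hk], by rw [← hab2]; exact ht⟩)
            · exact Or.inl ⟨hab, hab2⟩
          · exfalso
            have h1 : x.1 ≤ b.1 := ha b (by simp)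
            rcases List.mem_cons.mp hy' with h | hy''
            · exact hab (h ▸ hk)
            · have h3 : b.1 ≤ y.1 := (List.pairwise_cons.mp hp').1 y hy''
              exact hab (le_antisymm h1 (h3.trans (le_of_eq hk.symm)))
        · -- y = a, x ∈ b :: r
          subst hya
          by_cases hab : y.1 = b.1
          · by_cases hab2 : y.2 = b.2
            · have hxb : x ≠ b := fun h => ht (h ▸ hab2.symm ▸ rfl)
              have hx'' : x ∈ r := by
                rcases List.mem_cons.mp hx' with h | h
                · exact absurd h hxb
                · exact h
              exact Or.inr (ihr.mpr ⟨x, List.mem_cons_of_mem _ hx'', b, by simp,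
                by rw [hk, ← hab], by rw [← hab2]; exact ht⟩)
            · exact Or.inl ⟨hab, hab2⟩
          · exfalso
            have h1 : y.1 ≤ b.1 := ha b (by simp)
            rcases List.mem_cons.mp hx' with h | hx''
            · exact hab (h ▸ hk.symm)
            · have h3 : b.1 ≤ x.1 := (List.pairwise_cons.mp hp').1 x hx''
              exact hab (le_antisymm h1 (h3.trans (le_of_eq hk)))
        · exact Or.inr (ihr.mpr ⟨x, hx', y, hy', hk, ht⟩)

-- membership in B's tagged list
lemma mem_tagged (symbol : String) (fs : List String) (x : String × Int) :
    x ∈ fs.foldl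
        (fun acc f => acc ++ (symbol_variants f).map (fun v => (PySem.Str.upper v, (1 : Int))))
        ((symbol_variants symbol).map (fun v => (PySem.Str.upper v, (0 : Int)))) ↔
      (x.2 = 0 ∧ x.1 ∈ (symbol_variants symbol).map PySem.Str.upper) ∨
      (x.2 = 1 ∧ ∃ f ∈ fs, x.1 ∈ (symbol_variants f).map PySem.Str.upper) := by
  rw [PySem.List.foldl_append_eq_flatMap]
  simp only [List.mem_append, List.mem_flatMap, List.mem_map]
  constructor
  · rintro (⟨v, hv, rfl⟩ | ⟨f, hf, v, hv, rfl⟩)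
    · exact Or.inl ⟨rfl, v, hv, rfl⟩
    · exact Or.inr ⟨rfl, f, hf, v, hv, rfl⟩
  · rintro (⟨h0, v, hv, hu⟩ | ⟨h1, f, hf, v, hv, hu⟩)
    · exact Or.inl ⟨v, hv, Prod.ext hu h0.symm⟩
    · exact Or.inr ⟨f, hf, v, hv, Prod.ext hu h1.symm⟩

-- ===== VERDICT (by name: the statement is the Claim_ definition above) =====
theorem symbol_matches_spec : Claim_equal_symbol_matches := by
  intro symbol filters _
  unfold Spec_symbol_matches symbol_matches symbol_matches_alt
  match filters with
  | none => rfl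
  | some fs =>
    by_cases h : fs = []
    · simp [h]
    · simp only [if_neg h]
      rw [PySem.List.slice_from_one]
      rw [Bool.eq_iff_iff]
      rw [zip_any_eq_adjScan, crossing _ (PySem.List.sorted_pairwise _ _)]
      simp only [List.any_eq_true, nonempty_iff_exists, PySem.Set.mem_inter,
        PySem.Set.mem_ofList, PySem.List.mem_sorted, mem_tagged]
      constructor
      · rintro ⟨f, hf, k, hk, hkf⟩
        exact ⟨(k, 0), Or.inl ⟨rfl, hk⟩, (k, 1), Or.inr ⟨rfl, f, hf, hkf⟩, rfl, by norm_num⟩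
      · rintro ⟨x, hx, y, hy, hk, ht⟩
        rcases hx with ⟨hx2, hx1⟩ | ⟨hx2, f, hf, hx1⟩ <;>
          rcases hy with ⟨hy2, hy1⟩ | ⟨hy2, g, hg, hy1⟩
        · exact absurd (hx2.trans hy2.symm) ht
        · exact ⟨g, hg, x.1, hx1, hk ▸ hy1⟩
        · exact ⟨f, hf, y.1, hy1, hk ▸ hx1⟩
        · exact absurd (hx2.trans hy2.symm) ht
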